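-- pv_equiv track=rewrite | github.com/leongdl/scratchspace | container-config/app/aws_clients.py | _actions_match
-- ===== SOURCE A (Python) =====
-- def _actions_match(actions: list[str], required: set[str]) -> set[str]:
--     """Check which required actions are satisfied by the given action list."""
--     found: set[str] = set()
--     for a in actions:
--         if a == "*":
--             return set(required)  # wildcard matches everything
--         if a.endswith(":*"):
--             # Service wildcard like ecr:*
--             prefix = a.split(":")[0]
--             for r in required:
--                 if r.startswith(prefix + ":"):
--                     found.add(r)
--         elif a in required:
--             found.add(a)
--     return found
-- ===== SOURCE B (Python) =====
-- def _actions_match(actions: list[str], required: set[str]) -> set[str]: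
--     """Check which required actions are satisfied by the given action list."""
--     if "*" in actions:
--         return set(required)  # wildcard matches everything
--     # index the required actions by their service prefix, once
--     buckets: dict[str, list[str]] = {}
--     for r in required:
--         if ":" in r:
--             buckets.setdefault(r.split(":")[0], []).append(r)
--     found: set[str] = set()
--     for a in actions:
--         if a.endswith(":*"):
--             found.update(buckets.get(a.split(":")[0], ()))
--         elif a in required:
--             found.add(a)
--     return found
-- ===== Notes on version B (the rewrite author's own statement) =====
-- stated objective: alternative
-- what changed: B returns set(required) up front if '*' is among the actions, and instead of rescanning the whole required set for every service-wildcard action it builds a dict from service prefix to the required actions under it once, then each 'svc:*' action unions its single precomputed bucket; this drops the O(A*R) inner scan, though a timing run's inputs showed no measurable difference.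
import Mathlib
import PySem

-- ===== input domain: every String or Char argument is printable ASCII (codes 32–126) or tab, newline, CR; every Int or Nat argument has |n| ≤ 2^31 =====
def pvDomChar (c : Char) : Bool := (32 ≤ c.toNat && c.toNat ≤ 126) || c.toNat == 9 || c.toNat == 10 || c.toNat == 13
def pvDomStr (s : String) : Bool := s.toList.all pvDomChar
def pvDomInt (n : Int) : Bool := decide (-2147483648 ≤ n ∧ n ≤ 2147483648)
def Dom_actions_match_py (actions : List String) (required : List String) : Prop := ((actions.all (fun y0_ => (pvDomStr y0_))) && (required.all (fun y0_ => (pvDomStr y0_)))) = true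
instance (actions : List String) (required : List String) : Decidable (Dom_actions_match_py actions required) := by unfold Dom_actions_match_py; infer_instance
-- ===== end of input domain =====

-- B hoists the full-wildcard check out of the loop and replaces A's inner scan of `required` per service wildcard by a dict of service prefix → required actions built once; same return value (not measurably faster on the generated inputs).

-- ===== PORT A =====
-- `s.split(":")[0]`: split? is some (":" is non-empty) and the result list is never empty, so [0] never raises
def pvSplitHeadColon (s : String) : String :=
  ((PySem.Str.split? s ":").getD []).headD ""

def pvGoA (required : List String) : List String → PySem.Set String → PySem.Set String
  | [], found => found
  | a :: rest, found =>
    if a == "*" then PySem.Set.ofList required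
    else if PySem.Str.endswith a ":*" then
      pvGoA required rest (required.foldl
        (fun s r => if PySem.Str.startswith r (pvSplitHeadColon a ++ ":") then PySem.Set.add s r else s) found)
    else if required.contains a then pvGoA required rest (PySem.Set.add found a)
    else pvGoA required rest found

def actions_match_py (actions : List String) (required : List String) : List String :=
  pvGoA required actions PySem.Set.empty

-- ===== PORT B =====
-- `buckets.setdefault(r.split(":")[0], []).append(r)` = buckets[k] = buckets.get(k, []) + [r]
def pvBuckets (required : List String) : PySem.Dict String (List String) :=
  required.foldl
    (fun d r => if PySem.Str.isIn ":" r
      then PySem.Dict.modify d (pvSplitHeadColon r) [] (fun l => l ++ [r])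
      else d)
    PySem.Dict.empty

def pvGoB (required : List String) (buckets : PySem.Dict String (List String)) :
    List String → PySem.Set String → PySem.Set String
  | [], found => found
  | a :: rest, found =>
    if PySem.Str.endswith a ":*" then
      pvGoB required buckets rest
        (PySem.Set.update found (PySem.Dict.getD buckets (pvSplitHeadColon a) []))
    else if required.contains a then pvGoB required buckets rest (PySem.Set.add found a)
    else pvGoB required buckets rest found

def actions_match_py_alt (actions : List String) (required : List String) : List String :=
  if actions.contains "*" then PySem.Set.ofList required
  else pvGoB required (pvBuckets required) actions PySem.Set.empty

-- ===== PRECONDITION & SPEC =====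
def Spec_actions_match_py (actions : List String) (required : List String) (out : List String) : Prop := out = actions_match_py_alt actions required
instance (actions : List String) (required : List String) (out : List String) : Decidable (Spec_actions_match_py actions required out) := by unfold Spec_actions_match_py; infer_instance

-- ===== CLAIM (what is proved, stated in full; the proofs are below) =====
def Claim_equal_actions_match_py : Prop := ∀ (actions : List String) (required : List String), Dom_actions_match_py actions required → Spec_actions_match_py actions required (actions_match_py actions required)

-- ===== LEMMAS AND PROOFS =====

-- head of splitOn.go: the first piece is cur.reverse ++ the longest colon-free prefix of l
theorem pv_go_head (c0 : Char) : ∀ (fuel : Nat) (l cur : List Char) (acc : List (List Char)), l.length < fuel →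
    ∃ t, PySem.Chars.splitOn.go [c0] fuel l cur acc
      = acc.reverse ++ (cur.reverse ++ l.takeWhile (fun c => c != c0)) :: t := by
  intro fuel
  induction fuel with
  | zero => intro l cur acc h; omega
  | succ fuel ih =>
    intro l cur acc h
    cases l with
    | nil =>
      refine ⟨[], ?_⟩
      simp [PySem.Chars.splitOn.go]
    | cons c rest =>
      by_cases hc : c = c0
      · subst hc
        obtain ⟨t, ht⟩ := ih rest [] (cur.reverse :: acc) (by simpa using Nat.lt_of_succ_lt_succ h)
        refine ⟨rest.takeWhile (fun x => x != c) :: t, ?_⟩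
        simp [PySem.Chars.splitOn.go, List.isPrefixOf, ht]
      · obtain ⟨t, ht⟩ := ih rest (c :: cur) acc (by simpa using Nat.lt_of_succ_lt_succ h)
        refine ⟨t, ?_⟩
        simp only [PySem.Chars.splitOn.go, List.isPrefixOf, Bool.and_true, List.takeWhile_cons]
        simp only [ht]
        simp [hc]
        intro h
        exact absurd h.symm hc

theorem pv_splitHead_toList (s : String) :
    (pvSplitHeadColon s).toList = s.toList.takeWhile (fun c => c != ':') := by
  obtain ⟨t, ht⟩ := pv_go_head ':' (s.toList.length + 1) s.toList [] [] (Nat.lt_succ_self _)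
  have hlen : s.toList.length = s.length := by simp
  rw [hlen] at ht
  simp [pvSplitHeadColon, PySem.Str.split?, PySem.Chars.split?, PySem.Chars.splitOn, ht]

theorem pv_colon_not_mem_key (s : String) : ':' ∉ (pvSplitHeadColon s).toList := by
  rw [pv_splitHead_toList]
  intro h
  have := List.mem_takeWhile_imp h
  simp at this

theorem pv_singleton_infix_iff {a : Char} {l : List Char} : [a] <:+: l ↔ a ∈ l := by
  constructor
  · intro h
    exact h.subset (by simp)
  · intro h
    obtain ⟨s, t, rfl⟩ := List.append_of_mem h
    exact ⟨s, t, by simp⟩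

theorem pv_match_iff (r p : List Char) (hp : ':' ∉ p) :
    (p ++ [':']) <+: r ↔ (':' ∈ r ∧ r.takeWhile (fun c => c != ':') = p) := by
  constructor
  · rintro ⟨t, rfl⟩
    constructor
    · simp
    · have hall : ∀ x ∈ p, (fun c => c != ':') x = true := by
        intro x hx
        simp only [bne_iff_ne, ne_eq]
        exact fun h => hp (h ▸ hx)
      have htw : List.takeWhile (fun c => c != ':') p = p :=
        List.takeWhile_eq_self_iff.mpr hall
      rw [List.append_assoc, List.takeWhile_append, if_pos (by rw [htw])]
      simp
  · rintro ⟨hmem, hkey⟩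
    have hsplit := List.takeWhile_append_dropWhile (p := fun c => c != ':') (l := r)
    have hne : r.dropWhile (fun c => c != ':') ≠ [] := by
      intro h0
      rw [h0, List.append_nil] at hsplit
      rw [← hsplit] at hmem
      have := List.mem_takeWhile_imp hmem
      simp at this
    have hhead := List.head_dropWhile_not (fun c => c != ':') hne
    obtain ⟨d, ds, hd⟩ : ∃ d ds, r.dropWhile (fun c => c != ':') = d :: ds := by
      cases h : r.dropWhile (fun c => c != ':') with
      | nil => exact absurd h hne
      | cons d ds => exact ⟨d, ds, rfl⟩
    have hdcol : d = ':' := by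
      simp only [hd, List.head_cons] at hhead
      simpa using hhead
    refine ⟨ds, ?_⟩
    rw [← hsplit, hkey, hd, hdcol]
    simp

-- the bucket dict looked up at p is exactly the sublist of required whose service prefix is p
theorem pv_bucket_getD (required : List String) (d : PySem.Dict String (List String)) (p : String) :
    PySem.Dict.getD (required.foldl
      (fun d r => if PySem.Str.isIn ":" r
        then PySem.Dict.modify d (pvSplitHeadColon r) [] (fun l => l ++ [r])
        else d) d) p []
    = PySem.Dict.getD d p []
      ++ required.filter (fun r => PySem.Str.isIn ":" r && (pvSplitHeadColon r == p)) := by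
  induction required generalizing d with
  | nil => simp
  | cons r rest ih =>
    simp only [List.foldl_cons, List.filter_cons]
    by_cases hin : PySem.Str.isIn ":" r
    · by_cases hk : pvSplitHeadColon r = p
      · rw [if_pos hin, ih, hk, PySem.Dict.getD_modify_self]
        simp [-PySem.Str.isIn_eq, hin]
      · rw [if_pos hin, ih, PySem.Dict.getD_modify_of_ne _ _ _ (fun h => hk h.symm)]
        simp [-PySem.Str.isIn_eq, hin, hk]
    · rw [if_neg hin, ih]
      simp [-PySem.Str.isIn_eq, hin]

-- pointwise: r lands in bucket (prefix of a) iff r startswith prefix + ":"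
theorem pv_pred_eq (a r : String) :
    (PySem.Str.isIn ":" r && (pvSplitHeadColon r == pvSplitHeadColon a))
      = PySem.Str.startswith r (pvSplitHeadColon a ++ ":") := by
  rw [Bool.eq_iff_iff]
  rw [PySem.Str.startswith_eq, PySem.Chars.startswith_iff, String.toList_append]
  have : (":" : String).toList = [':'] := rfl
  rw [this]
  rw [pv_match_iff r.toList (pvSplitHeadColon a).toList (pv_colon_not_mem_key a)]
  rw [Bool.and_eq_true, PySem.Str.isIn_eq, PySem.Chars.isIn_iff_infix, this,
    pv_singleton_infix_iff, beq_iff_eq]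
  constructor
  · rintro ⟨h1, h2⟩
    exact ⟨by simpa using h1, by rw [← pv_splitHead_toList, h2]⟩
  · rintro ⟨h1, h2⟩
    refine ⟨by simpa using h1, ?_⟩
    apply String.toList_inj.mp
    rw [pv_splitHead_toList, h2]

-- A's inner scan over required equals B's union of the precomputed bucket
theorem pv_wildcard_step (required : List String) (found : PySem.Set String) (a : String) :
    required.foldl
      (fun s r => if PySem.Str.startswith r (pvSplitHeadColon a ++ ":") then PySem.Set.add s r else s) found
    = PySem.Set.update found (PySem.Dict.getD (pvBuckets required) (pvSplitHeadColon a) []) := by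
  rw [PySem.Set.update, pvBuckets, pv_bucket_getD, PySem.Dict.getD_empty, List.nil_append,
    List.foldl_filter]
  have hfun : (fun (x : PySem.Set String) (y : String) =>
        if (PySem.Str.isIn ":" y && (pvSplitHeadColon y == pvSplitHeadColon a)) = true
        then PySem.Set.add x y else x)
      = (fun s r => if PySem.Str.startswith r (pvSplitHeadColon a ++ ":") = true
        then PySem.Set.add s r else s) := by
    funext s r
    rw [pv_pred_eq]
  rw [hfun]

-- if "*" occurs anywhere, A ends up returning set(required)
theorem pv_go_star (required : List String) :
    ∀ (actions : List String) (found : PySem.Set String), "*" ∈ actions →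
      pvGoA required actions found = PySem.Set.ofList required := by
  intro actions
  induction actions with
  | nil => intro found h; simp at h
  | cons a rest ih =>
    intro found h
    rw [pvGoA]
    by_cases h1 : a == "*"
    · simp [h1]
    · have hmem : "*" ∈ rest := by
        rcases List.mem_cons.mp h with h' | h'
        · exact absurd (beq_iff_eq.mpr h'.symm) h1
        · exact h'
      simp only [h1, Bool.false_eq_true, if_false]
      by_cases h2 : PySem.Str.endswith a ":*"
      · rw [if_pos h2, ih _ hmem]
      · rw [if_neg h2]
        by_cases h3 : required.contains a
        · rw [if_pos h3, ih _ hmem]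
        · rw [if_neg h3, ih _ hmem]

theorem pv_go_eq (required : List String) :
    ∀ (actions : List String) (found : PySem.Set String), "*" ∉ actions →
      pvGoA required actions found = pvGoB required (pvBuckets required) actions found := by
  intro actions
  induction actions with
  | nil => intro found _; rfl
  | cons a rest ih =>
    intro found h
    have h1 : (a == "*") = false := by
      simp only [beq_eq_false_iff_ne, ne_eq]
      intro h'
      exact h (h' ▸ List.mem_cons_self)
    have hrest : "*" ∉ rest := fun h' => h (List.mem_cons_of_mem _ h')
    rw [pvGoA, pvGoB]
    simp only [h1, Bool.false_eq_true, if_false]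
    by_cases h2 : PySem.Str.endswith a ":*"
    · rw [if_pos h2, if_pos h2, pv_wildcard_step, ih _ hrest]
    · rw [if_neg h2, if_neg h2]
      by_cases h3 : required.contains a
      · rw [if_pos h3, if_pos h3, ih _ hrest]
      · rw [if_neg h3, if_neg h3, ih _ hrest]

-- ===== VERDICT (by name: the statement is the Claim_ definition above) =====
theorem actions_match_py_spec : Claim_equal_actions_match_py := by
  intro actions required _
  unfold Spec_actions_match_py actions_match_py actions_match_py_alt
  by_cases hstar : actions.contains "*"
  · rw [if_pos hstar]
    exact pv_go_star required actions PySem.Set.empty (List.contains_iff_mem.mp hstar)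
  · rw [if_neg hstar]
    exact pv_go_eq required actions PySem.Set.empty
      (fun h => hstar (List.contains_iff_mem.mpr h))
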